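-- pv_equiv track=rewrite | github.com/UsmanGill-UG/Technical-Interview-Questions-Guide | Arbisoft/2023 Fresh Grad Test/Solution/line.py | calculate_standing_floors
-- ===== SOURCE A (Python) =====
-- def calculate_standing_floors(floors, buildings):
--     floors_remaining = []
--     for building in range(buildings):
--         count = 0
--         for floor_number in range(len(floors)):
--             if floors[floor_number][building] != 0:
--                 count = len(floors) - count
--                 break
--             else:
--                 count += 1
--         floors_remaining.append(count)
--     return floors_remaining
-- ===== SOURCE B (Python) =====
-- def calculate_standing_floors(floors, buildings):
--     n = len(floors)
--     result = [n] * buildings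
--     unresolved = list(range(buildings))
--     for i, row in enumerate(floors):
--         if not unresolved:
--             break
--         still = []
--         for b in unresolved:
--             if row[b] != 0:
--                 result[b] = n - i
--             else:
--                 still.append(b)
--         unresolved = still
--     return result
-- ===== Notes on version B (the rewrite author's own statement) =====
-- stated objective: alternative
-- what changed: Inverted the traversal from column-major rescans to a single row-major top-to-bottom pass that keeps a shrinking worklist of still-unresolved buildings (and stops early once all columns are resolved), starting from the all-zero-column answer. Pre_ requires every row to be at least `buildings` wide, slightly narrower than A's exact non-raising condition: A stops a column scan at the first nonzero, so a short later row sometimes escapes being indexed and A still returns.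
-- outside the precondition, e.g. on calculate_standing_floors([[1, 2], [5]], 2): A returns [2, 2], B returns [2, 2]
import Mathlib
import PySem

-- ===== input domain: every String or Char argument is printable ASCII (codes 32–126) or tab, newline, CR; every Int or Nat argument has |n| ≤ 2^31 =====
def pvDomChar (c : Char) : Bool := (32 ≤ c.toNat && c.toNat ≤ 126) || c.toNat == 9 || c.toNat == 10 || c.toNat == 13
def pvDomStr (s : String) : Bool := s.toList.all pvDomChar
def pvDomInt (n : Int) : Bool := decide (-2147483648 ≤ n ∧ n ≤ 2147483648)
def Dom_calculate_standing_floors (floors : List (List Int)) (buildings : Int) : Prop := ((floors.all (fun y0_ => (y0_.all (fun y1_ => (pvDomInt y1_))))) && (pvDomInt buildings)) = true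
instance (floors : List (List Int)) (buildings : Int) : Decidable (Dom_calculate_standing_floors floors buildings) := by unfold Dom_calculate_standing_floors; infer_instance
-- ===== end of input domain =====

-- B changes the traversal: one row-major pass with a shrinking worklist of unresolved
-- buildings instead of A's per-building column scan; equal return value on Pre_.

-- ===== PORT A =====
-- inner 'for floor_number in range(len(floors))' loop of A, with its running count;
-- 'floors[floor_number][building]' is pyGetD (in range under Pre_, where Python does not raise)
def pvALoop (rows : List (List Int)) (n b count : Int) : Int :=
  match rows with
  | [] => count
  | row :: rest =>
      if PySem.List.pyGetD row b 0 ≠ 0 then n - count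
      else pvALoop rest n b (count + 1)

def calculate_standing_floors (floors : List (List Int)) (buildings : Int) : List Int :=
  (PySem.List.pyRange 0 buildings 1).foldl
    (fun acc building => acc ++ [pvALoop floors (floors.length : Int) building 0]) []

-- ===== PORT B =====
-- inner 'for b in unresolved' loop of B: updates (result, still); 'result[b] = n - i' is pySetD
def pvBStep (row : List Int) (n i : Int) (p : List Int × List Int) (b : Int) : List Int × List Int :=
  if PySem.List.pyGetD row b 0 ≠ 0 then (PySem.List.pySetD p.1 b (n - i), p.2)
  else (p.1, p.2 ++ [b])

-- outer 'for i, row in enumerate(floors)' loop of B with the early break on empty worklist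
def pvBRows (rows : List (List Int)) (n i : Int) (res u : List Int) : List Int :=
  match rows with
  | [] => res
  | row :: rest =>
      if u.isEmpty then res
      else
        let p := u.foldl (pvBStep row n i) (res, [])
        pvBRows rest n (i + 1) p.1 p.2

def calculate_standing_floors_alt (floors : List (List Int)) (buildings : Int) : List Int :=
  pvBRows floors (floors.length : Int) 0
    (List.replicate buildings.toNat (floors.length : Int))
    (PySem.List.pyRange 0 buildings 1)

-- ===== PRECONDITION & SPEC =====
-- Pre_ excludes the inputs where Python A raises IndexError (a scanned row shorter than a
-- scanned building index). It is stated as 'every row is at least `buildings` wide', which is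
-- marginally stronger than the exact raising condition: A stops scanning a column at its first
-- nonzero entry, so a short row can escape being indexed on some inputs; the closed form covers
-- the intended rectangular inputs.
def Pre_calculate_standing_floors (floors : List (List Int)) (buildings : Int) : Prop :=
  ∀ row ∈ floors, buildings ≤ (row.length : Int)
instance (floors : List (List Int)) (buildings : Int) : Decidable (Pre_calculate_standing_floors floors buildings) := by unfold Pre_calculate_standing_floors; infer_instance

def pvWitness_calculate_standing_floors : List (List Int) × Int := ([[0, 1], [2, 3]], 2)

def Spec_calculate_standing_floors (floors : List (List Int)) (buildings : Int) (out : List Int) : Prop := out = calculate_standing_floors_alt floors buildings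
instance (floors : List (List Int)) (buildings : Int) (out : List Int) : Decidable (Spec_calculate_standing_floors floors buildings out) := by unfold Spec_calculate_standing_floors; infer_instance

-- ===== CLAIM (what is proved, stated in full; the proofs are below) =====
def Claim_equal_calculate_standing_floors : Prop := ∀ (floors : List (List Int)) (buildings : Int), Dom_calculate_standing_floors floors buildings → Pre_calculate_standing_floors floors buildings → Spec_calculate_standing_floors floors buildings (calculate_standing_floors floors buildings)

-- ===== LEMMAS AND PROOFS =====

-- index (relative) of the first row whose entry in column b is nonzero
def pvFirstHit (rows : List (List Int)) (b : Int) : Option Nat :=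
  match rows with
  | [] => none
  | row :: rest =>
      if PySem.List.pyGetD row b 0 ≠ 0 then some 0
      else (pvFirstHit rest b).map (· + 1)

lemma pvALoop_eq (rows : List (List Int)) (n b : Int) :
    ∀ count, pvALoop rows n b count =
      match pvFirstHit rows b with
      | some j => n - (count + (j : Int))
      | none => count + (rows.length : Int) := by
  induction rows with
  | nil => intro count; rw [pvALoop, pvFirstHit]; simp
  | cons row rest ih =>
      intro count
      rw [pvALoop, pvFirstHit]
      by_cases h : PySem.List.pyGetD row b 0 ≠ 0
      · rw [if_pos h, if_pos h]
        norm_num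
      · rw [if_neg h, if_neg h]
        rw [ih (count + 1)]
        cases pvFirstHit rest b with
        | none => simp; ring
        | some j => simp; ring

lemma pvBFold_spec (row : List Int) (n i : Int) :
    ∀ (u res s : List Int), (∀ b ∈ u, 0 ≤ b ∧ b < (res.length : Int)) →
      (u.foldl (pvBStep row n i) (res, s)).1.length = res.length ∧
      (u.foldl (pvBStep row n i) (res, s)).2
        = s ++ u.filter (fun b => decide (PySem.List.pyGetD row b 0 = 0)) ∧
      ∀ k : Nat, (u.foldl (pvBStep row n i) (res, s)).1[k]?
        = if (k : Int) ∈ u ∧ PySem.List.pyGetD row (k : Int) 0 ≠ 0 then some (n - i)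
          else res[k]? := by
  intro u
  induction u with
  | nil => intro res s _; simp
  | cons b u' ih =>
      intro res s hu
      have hb := hu b (by simp)
      simp only [List.foldl_cons]
      by_cases h : PySem.List.pyGetD row b 0 ≠ 0
      · -- step sets res[b]
        have hstep : pvBStep row n i (res, s) b = (res.set b.toNat (n - i), s) := by
          rw [pvBStep, if_pos h, PySem.List.pySetD_of_nonneg res (n - i) hb.1]
        rw [hstep]
        have hlen : (res.set b.toNat (n - i)).length = res.length := by simp
        obtain ⟨ih1, ih2, ih3⟩ := ih (res.set b.toNat (n - i)) s
          (by intro c hc; have := hu c (by simp [hc]); simpa [hlen] using this)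
        refine ⟨by rw [ih1, hlen], ?_, ?_⟩
        · rw [ih2, List.filter_cons_of_neg (by simpa using h)]
        intro k
        rw [ih3 k]
        by_cases hnzk : PySem.List.pyGetD row (k : Int) 0 ≠ 0
        · by_cases hm : (k : Int) ∈ u'
          · rw [if_pos ⟨hm, hnzk⟩, if_pos ⟨List.mem_cons_of_mem b hm, hnzk⟩]
          · rw [if_neg (fun c => hm c.1)]
            by_cases he : (k : Int) = b
            · rw [if_pos ⟨by simp [he], hnzk⟩, List.getElem?_set]
              have h1 : b.toNat = k := by omega
              have h2 : b.toNat < res.length := by omega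
              rw [if_pos h1, if_pos h2]
            · have hne : ¬ ((k : Int) ∈ b :: u' ∧ PySem.List.pyGetD row (k : Int) 0 ≠ 0) := by
                rintro ⟨hmem, -⟩
                rcases List.mem_cons.mp hmem with h1 | h1
                · exact he h1
                · exact hm h1
              rw [if_neg hne, List.getElem?_set,
                if_neg (fun hh : b.toNat = k => he (by omega))]
        · have hc1 : ¬ ((k : Int) ∈ u' ∧ PySem.List.pyGetD row (k : Int) 0 ≠ 0) :=
            fun c => hnzk c.2
          have hc2 : ¬ ((k : Int) ∈ b :: u' ∧ PySem.List.pyGetD row (k : Int) 0 ≠ 0) :=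
            fun c => hnzk c.2
          rw [if_neg hc1, if_neg hc2, List.getElem?_set]
          have hne : b.toNat ≠ k := by
            intro hh
            have hkb : (k : Int) = b := by omega
            exact hnzk (by rw [hkb]; exact h)
          rw [if_neg hne]
      · -- step appends b to still
        have hstep : pvBStep row n i (res, s) b = (res, s ++ [b]) := by
          rw [pvBStep, if_neg h]
        rw [hstep]
        obtain ⟨ih1, ih2, ih3⟩ := ih res (s ++ [b]) (by intro c hc; exact hu c (by simp [hc]))
        refine ⟨ih1, ?_, ?_⟩
        · rw [ih2, List.filter_cons_of_pos (by exact decide_eq_true (not_not.mp h)),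
            List.append_assoc, List.singleton_append]
        intro k
        rw [ih3 k]
        by_cases hc : (k : Int) ∈ u' ∧ PySem.List.pyGetD row (k : Int) 0 ≠ 0
        · rw [if_pos hc, if_pos ⟨List.mem_cons_of_mem b hc.1, hc.2⟩]
        · have hc2 : ¬ ((k : Int) ∈ b :: u' ∧ PySem.List.pyGetD row (k : Int) 0 ≠ 0) := by
            rintro ⟨hmem, hnz2⟩
            rcases List.mem_cons.mp hmem with h1 | h1
            · exact h (h1 ▸ hnz2)
            · exact hc ⟨h1, hnz2⟩
          rw [if_neg hc, if_neg hc2]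

lemma pvBRows_spec (n : Int) :
    ∀ (rows : List (List Int)) (i : Int) (res u : List Int),
      (∀ b ∈ u, 0 ≤ b ∧ b < (res.length : Int)) →
      (pvBRows rows n i res u).length = res.length ∧
      ∀ k : Nat, (pvBRows rows n i res u)[k]?
        = if (k : Int) ∈ u then
            (match pvFirstHit rows (k : Int) with
             | some j => some (n - (i + (j : Int)))
             | none => res[k]?)
          else res[k]? := by
  intro rows
  induction rows with
  | nil =>
      intro i res u _
      refine ⟨rfl, fun k => ?_⟩
      simp only [pvBRows, pvFirstHit]
      split <;> rfl
  | cons row rest ih =>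
      intro i res u hu
      rw [pvBRows]
      by_cases hemp : u.isEmpty
      · have : u = [] := List.isEmpty_iff.mp hemp
        subst this
        simp
      · simp only [hemp, Bool.false_eq_true, if_neg, not_false_iff]
        obtain ⟨f1, f2, f3⟩ := pvBFold_spec row n i u res [] hu
        set p := u.foldl (pvBStep row n i) (res, []) with hp
        have hu' : ∀ b ∈ p.2, 0 ≤ b ∧ b < (p.1.length : Int) := by
          intro c hc
          rw [f2] at hc
          simp only [List.nil_append, List.mem_filter] at hc
          have := hu c hc.1
          omega
        obtain ⟨g1, g2⟩ := ih (i + 1) p.1 p.2 hu'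
        refine ⟨by rw [g1, f1], fun k => ?_⟩
        rw [g2 k, f3 k, pvFirstHit]
        by_cases hku : (k : Int) ∈ u
        · by_cases hnz : PySem.List.pyGetD row (k : Int) 0 ≠ 0
          · have hknot : (k : Int) ∉ p.2 := by
              intro hcmem
              rw [f2] at hcmem
              simp only [List.nil_append, List.mem_filter] at hcmem
              exact hnz (of_decide_eq_true hcmem.2)
            rw [if_neg hknot, if_pos ⟨hku, hnz⟩, if_pos hku, if_pos hnz]
            norm_num
          · have hkin : (k : Int) ∈ p.2 := by
              rw [f2]
              simp only [List.nil_append]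
              exact List.mem_filter.mpr ⟨hku, decide_eq_true (not_not.mp hnz)⟩
            rw [if_pos hkin, if_pos hku, if_neg (fun hh : _ ∧ _ => hnz hh.2), if_neg hnz]
            cases pvFirstHit rest (k : Int) with
            | none => simp
            | some j =>
                simp only [Option.map_some]
                push_cast
                have : n - (i + 1 + (j : Int)) = n - (i + ((j : Int) + 1)) := by ring
                rw [this]
        · have hknot : (k : Int) ∉ p.2 := by
            intro hcmem
            rw [f2] at hcmem
            simp only [List.nil_append, List.mem_filter] at hcmem
            exact hku hcmem.1
          rw [if_neg hknot, if_neg hku,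
            if_neg (fun hh : _ ∧ _ => hku hh.1)]

lemma pvA_eq_map (floors : List (List Int)) (buildings : Int) :
    calculate_standing_floors floors buildings
      = (PySem.List.pyRange 0 buildings 1).map
          (fun b => pvALoop floors (floors.length : Int) b 0) := by
  unfold calculate_standing_floors
  rw [PySem.List.foldl_append_singleton_eq_map, List.nil_append]

-- ===== VERDICT (by name: the statement is the Claim_ definition above) =====
theorem calculate_standing_floors_spec : Claim_equal_calculate_standing_floors := by
  intro floors buildings _ _
  unfold Spec_calculate_standing_floors calculate_standing_floors_alt
  have hres : (List.replicate buildings.toNat (floors.length : Int)).length = buildings.toNat := by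
    simp
  have hu : ∀ b ∈ PySem.List.pyRange 0 buildings 1,
      0 ≤ b ∧ b < ((List.replicate buildings.toNat (floors.length : Int)).length : Int) := by
    intro b hb
    rw [PySem.List.mem_pyRange_one] at hb
    rw [hres]
    omega
  obtain ⟨hlen, hget⟩ := pvBRows_spec (floors.length : Int) floors 0
    (List.replicate buildings.toNat (floors.length : Int))
    (PySem.List.pyRange 0 buildings 1) hu
  rw [pvA_eq_map]
  apply List.ext_getElem?
  intro k
  rw [hget k, List.getElem?_map, PySem.List.getElem?_pyRange_one, List.getElem?_replicate]
  by_cases hk : k < buildings.toNat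
  · have hmem : (k : Int) ∈ PySem.List.pyRange 0 buildings 1 := by
      rw [PySem.List.mem_pyRange_one]
      omega
    have hkr : k < (buildings - 0).toNat := by omega
    rw [if_pos hkr, if_pos hmem, if_pos hk]
    simp only [Option.map_some]
    rw [pvALoop_eq floors (floors.length : Int) ((0 : Int) + (k : Int)) 0]
    have hzk : (0 : Int) + (k : Int) = (k : Int) := by ring
    rw [hzk]
    cases pvFirstHit floors (k : Int) with
    | some j => simp
    | none => simp
  · have hnmem : (k : Int) ∉ PySem.List.pyRange 0 buildings 1 := by
      rw [PySem.List.mem_pyRange_one]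
      intro hh
      omega
    have hkr : ¬ k < (buildings - 0).toNat := by omega
    rw [if_neg hkr, if_neg hnmem, if_neg hk]
    rfl
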